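-- pv_equiv track=rewrite | github.com/BinuraSG/Python-Assignments | A5 - Various Functions.py | third_at_least
-- ===== SOURCE A (Python) =====
-- def third_at_least(a):
--     n = ((len(a))//3)+1
--     for i in range(len(a)):
--         count = 0
--         for k in range(len(a)):
--             if a[k] == a[i]:
--                 count+=1
--                 if count >= n:
--                     return a[i]
-- ===== SOURCE B (Python) =====
-- def third_at_least(a):
--     n = ((len(a))//3)+1
--     counts = {}
--     for x in a:
--         counts[x] = counts.get(x, 0) + 1
--     for k, c in counts.items():
--         if c >= n:
--             return k
--     return None
-- ===== Notes on version B (the rewrite author's own statement) =====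
-- stated objective: faster
-- what changed: Replaces the quadratic nested index scan with one frequency-dict pass followed by a scan over the keys in first-occurrence order.
import Mathlib
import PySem

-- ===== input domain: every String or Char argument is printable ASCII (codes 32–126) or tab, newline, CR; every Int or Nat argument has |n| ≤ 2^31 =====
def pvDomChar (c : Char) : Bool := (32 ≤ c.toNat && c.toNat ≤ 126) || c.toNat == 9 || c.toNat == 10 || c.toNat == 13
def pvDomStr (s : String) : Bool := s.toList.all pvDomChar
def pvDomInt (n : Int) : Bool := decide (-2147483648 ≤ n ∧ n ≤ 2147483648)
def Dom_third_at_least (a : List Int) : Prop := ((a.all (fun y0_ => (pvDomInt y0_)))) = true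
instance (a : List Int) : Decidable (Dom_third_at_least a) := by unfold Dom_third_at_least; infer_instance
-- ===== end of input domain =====

-- B replaces A's quadratic nested index scan with one frequency-dict pass and a scan over its keys.

-- ===== PORT A =====
-- inner loop: 'for k in range(len(a)): if a[k] == a[i]: count += 1; if count >= n: return a[i]'
def taInner (v n : Int) : List Int → Int → Option Int
  | [], _ => none
  | x :: rest, count =>
      if x == v then
        if n ≤ count + 1 then some v else taInner v n rest (count + 1)
      else taInner v n rest count

-- outer loop: 'for i in range(len(a)): count = 0; <inner>'
def taOuter (full : List Int) (n : Int) : List Int → Option Int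
  | [] => none
  | v :: rest =>
      match taInner v n full 0 with
      | some r => some r
      | none => taOuter full n rest

def third_at_least (a : List Int) : Option Int :=
  let n : Int := PySem.Int.floordiv (PySem.List.len a) 3 + 1
  taOuter a n a

-- ===== PORT B =====
def third_at_least_alt (a : List Int) : Option Int :=
  let n : Int := PySem.Int.floordiv (PySem.List.len a) 3 + 1
  let counts := a.foldl (fun d x => d.insert x (d.getD x 0 + 1)) PySem.Dict.empty
  (counts.items.find? (fun p => decide (n ≤ p.2))).map (·.1)

-- ===== PRECONDITION & SPEC =====
def Spec_third_at_least (a : List Int) (out : Option Int) : Prop := out = third_at_least_alt a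
instance (a : List Int) (out : Option Int) : Decidable (Spec_third_at_least a out) := by unfold Spec_third_at_least; infer_instance

-- ===== CLAIM (what is proved, stated in full; the proofs are below) =====
def Claim_equal_third_at_least : Prop := ∀ (a : List Int), Dom_third_at_least a → Spec_third_at_least a (third_at_least a)

-- ===== LEMMAS AND PROOFS =====

theorem taInner_eq (v n : Int) (l : List Int) : ∀ c : Int, c < n →
    taInner v n l c = if n ≤ c + l.count v then some v else none := by
  induction l with
  | nil => intro c hc; simp [taInner]; omega
  | cons x rest ih =>
      intro c hc
      by_cases hx : x = v
      · subst hx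
        simp only [taInner, beq_self_eq_true, if_true, List.count_cons_self]
        by_cases h1 : n ≤ c + 1
        · rw [if_pos h1, if_pos (by push_cast; omega)]
        · rw [if_neg h1, ih (c + 1) (by omega)]
          by_cases h2 : n ≤ c + 1 + (rest.count x : Int)
          · rw [if_pos h2, if_pos (by push_cast at h2 ⊢; omega)]
          · rw [if_neg h2, if_neg (by push_cast at h2 ⊢; omega)]
      · simp only [taInner, beq_iff_eq, hx, if_false, List.count_cons_of_ne (by simpa using hx)]
        exact ih c hc

theorem taOuter_eq (full : List Int) (n : Int) (hn : 0 < n) (rest : List Int) :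
    taOuter full n rest = rest.find? (fun v => decide (n ≤ (full.count v : Int))) := by
  induction rest with
  | nil => rfl
  | cons v r ih =>
      simp only [taOuter, taInner_eq v n full 0 hn, List.find?]
      by_cases h : n ≤ (0 : Int) + full.count v
      · rw [if_pos h]
        have : decide (n ≤ (full.count v : Int)) = true := by simpa using h
        simp [this]
      · rw [if_neg h]
        have : decide (n ≤ (full.count v : Int)) = false := by simpa using h
        simp [this, ih]

theorem find?_discard (q : Int → Bool) (x : Int) (hx : q x = false) (s : List Int) :
    (PySem.Set.discard s x).find? q = s.find? q := by
  induction s with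
  | nil => rfl
  | cons y t ih =>
      by_cases hy : y = x
      · subst hy; simpa [PySem.Set.discard, hx] using ih
      · simp [PySem.Set.discard, hy, List.find?] at ih ⊢
        simp [ih]

theorem find?_ofList (q : Int → Bool) (xs : List Int) :
    (PySem.Set.ofList xs).find? q = xs.find? q := by
  induction xs with
  | nil => rfl
  | cons x t ih =>
      rw [PySem.Set.ofList_cons]
      cases hq : q x with
      | true => simp [List.find?, hq]
      | false => simp only [List.find?, hq, find?_discard q x hq, ih]

theorem n_pos (a : List Int) : 0 < PySem.Int.floordiv (PySem.List.len a) 3 + 1 := by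
  have h : PySem.Int.floordiv (PySem.List.len a) 3 = ((a.length / 3 : Nat) : Int) := by
    simp [PySem.List.len]
  omega

-- ===== VERDICT (by name: the statement is the Claim_ definition above) =====
theorem third_at_least_spec : Claim_equal_third_at_least := by
  intro a _
  show taOuter a (PySem.Int.floordiv (PySem.List.len a) 3 + 1) a = _
  unfold third_at_least_alt
  dsimp only
  rw [PySem.Dict.foldl_insert_getD_add_one_eq_counter, PySem.Dict.items_counter,
      List.find?_map, taOuter_eq a _ (n_pos a) a, find?_ofList]
  simp only [Function.comp_def]
  generalize PySem.Int.floordiv (PySem.List.len a) 3 + 1 = n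
  cases h : List.find? (fun v => decide (n ≤ (a.count v : Int))) a with
  | none => rfl
  | some v => rfl
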